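-- pv_equiv track=rewrite | github.com/nomelancholy/problem_solving | 프로그래머스/lv1/76501. 음양 더하기/음양 더하기.py | solution
-- ===== SOURCE A (Python) =====
-- def solution(absolutes, signs):
--
--     real = []
--
--     for i, n in enumerate(absolutes):
--         if not signs[i]:
--             n *= -1
--         real.append(n)
--
--     answer = sum(real)
--
--     return answer
-- ===== SOURCE B (Python) =====
-- def solution(absolutes, signs):
--     total = sum(absolutes)
--     neg = sum(n for n, s in zip(absolutes, signs) if not s)
--     return total - 2 * neg
-- ===== Notes on version B (the rewrite author's own statement) =====
-- stated objective: alternative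
-- what changed: Instead of building a list of per-element signed values and summing it, B computes the plain total of absolutes and the total of the negatively-signed subset over zip(absolutes, signs), returning total - 2*neg.
import Mathlib
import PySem

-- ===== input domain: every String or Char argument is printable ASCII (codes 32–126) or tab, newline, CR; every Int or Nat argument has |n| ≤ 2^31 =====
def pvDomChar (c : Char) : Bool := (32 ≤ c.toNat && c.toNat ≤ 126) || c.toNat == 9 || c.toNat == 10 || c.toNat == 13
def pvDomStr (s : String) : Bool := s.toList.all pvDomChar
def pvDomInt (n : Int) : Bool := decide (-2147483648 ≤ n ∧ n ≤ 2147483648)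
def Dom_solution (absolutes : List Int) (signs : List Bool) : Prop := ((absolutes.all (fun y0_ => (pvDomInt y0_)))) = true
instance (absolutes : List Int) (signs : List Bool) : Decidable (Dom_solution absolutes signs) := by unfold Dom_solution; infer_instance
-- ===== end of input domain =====

-- B replaces A's per-element signed list with two reductions (total and negative-subset sum over zip): alternative decomposition, same cost.

-- ===== PORT A =====
def solution (absolutes : List Int) (signs : List Bool) : Int :=
  let real : List Int :=
    (PySem.List.enumerate absolutes).foldl
      (fun r p => r ++ [if PySem.List.pyGetD signs p.1 false then p.2 else -p.2]) []
  real.sum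

-- ===== PORT B =====
def solution_alt (absolutes : List Int) (signs : List Bool) : Int :=
  let total := absolutes.sum
  let neg := (absolutes.zip signs).foldl (fun acc p => if p.2 then acc else acc + p.1) 0
  total - 2 * neg

-- ===== PRECONDITION & SPEC =====
-- Pre_ excludes exactly the inputs where A raises IndexError at signs[i] (signs shorter than absolutes).
def Pre_solution (absolutes : List Int) (signs : List Bool) : Prop :=
  absolutes.length ≤ signs.length
instance (absolutes : List Int) (signs : List Bool) : Decidable (Pre_solution absolutes signs) := by
  unfold Pre_solution; infer_instance
def pvWitness_solution : List Int × List Bool := ([4, 7, 12], [true, false, true])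

def Spec_solution (absolutes : List Int) (signs : List Bool) (out : Int) : Prop := out = solution_alt absolutes signs
instance (absolutes : List Int) (signs : List Bool) (out : Int) : Decidable (Spec_solution absolutes signs out) := by unfold Spec_solution; infer_instance

-- ===== CLAIM (what is proved, stated in full; the proofs are below) =====
def Claim_equal_solution : Prop := ∀ (absolutes : List Int) (signs : List Bool), Dom_solution absolutes signs → Pre_solution absolutes signs → Spec_solution absolutes signs (solution absolutes signs)

-- ===== LEMMAS AND PROOFS =====

-- shifting the enumerate start by one matches consing a sign onto signs
lemma shift_lemma (a : List Int) (b : Bool) (s : List Bool) :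
    ∀ (k : Nat),
    ((PySem.List.enumerate a ((k : Int) + 1)).map
      (fun p => if PySem.List.pyGetD (b :: s) p.1 false then p.2 else -p.2)).sum
    = ((PySem.List.enumerate a (k : Int)).map
      (fun p => if PySem.List.pyGetD s p.1 false then p.2 else -p.2)).sum := by
  induction a with
  | nil => intro k; simp [PySem.List.enumerate_nil]
  | cons x a ih =>
    intro k
    rw [PySem.List.enumerate_cons, PySem.List.enumerate_cons]
    have h1 : ((k : Int) + 1) = ((k + 1 : Nat) : Int) := by push_cast; ring
    have h2 : ((k : Int) + 1 + 1) = ((k + 1 : Nat) : Int) + 1 := by push_cast; ring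
    simp only [List.map_cons, List.sum_cons, h1, ih (k + 1),
      PySem.List.pyGetD_natCast, List.getD_cons_succ]

-- the B-side fold with a general accumulator
lemma negfold_acc (l : List (Int × Bool)) :
    ∀ (c : Int),
    l.foldl (fun acc p => if p.2 then acc else acc + p.1) c
    = c + l.foldl (fun acc p => if p.2 then acc else acc + p.1) 0 := by
  induction l with
  | nil => intro c; simp
  | cons p l ih =>
    intro c
    simp only [List.foldl_cons]
    rw [ih (if p.2 then c else c + p.1), ih (if p.2 then 0 else 0 + p.1)]
    by_cases h : p.2 <;> simp [h] <;> ring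

lemma main_lemma :
    ∀ (a : List Int) (s : List Bool), a.length ≤ s.length →
    ((PySem.List.enumerate a 0).map
      (fun p => if PySem.List.pyGetD s p.1 false then p.2 else -p.2)).sum
    = a.sum - 2 * ((a.zip s).foldl (fun acc p => if p.2 then acc else acc + p.1) 0) := by
  intro a
  induction a with
  | nil => intro s _; simp [PySem.List.enumerate_nil]
  | cons x a ih =>
    intro s hs
    cases s with
    | nil => simp at hs
    | cons b s =>
      rw [PySem.List.enumerate_cons]
      simp only [List.map_cons, List.sum_cons]
      have h0 : (0 : Int) + 1 = ((0 : Nat) : Int) + 1 := by norm_num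
      rw [h0, shift_lemma a b s 0]
      simp only [Nat.cast_zero]
      rw [ih s (by simpa using Nat.le_of_succ_le_succ hs)]
      simp only [List.zip_cons_cons, List.foldl_cons]
      rw [negfold_acc ((a.zip s)) (if b then 0 else 0 + x)]
      simp only [PySem.List.pyGetD_zero_cons]
      by_cases h : b <;> simp [h] <;> ring

-- ===== VERDICT (by name: the statement is the Claim_ definition above) =====
theorem solution_spec : Claim_equal_solution := by
  intro a s _ hpre
  unfold Spec_solution solution solution_alt
  simp only []
  rw [PySem.List.foldl_append_singleton_eq_map]
  simpa using main_lemma a s hpre
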